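-- pv_equiv track=rewrite | github.com/amirozhan/task_stimuli | utils/multfs_trevor/1back_tcs_gen.py | _build_segments_for_ntcs
-- ===== SOURCE A (Python) =====
-- from typing import List, Optional, Tuple, Dict
--
-- def _debruijn_indices(k: int, n: int) -> List[int]:
--     a = [0] * (k * n)
--     seq = []
--     def db(t, p):
--         if t > n:
--             if n % p == 0:
--                 seq.extend(a[1:p+1])
--         else:
--             a[t] = a[t - p]
--             db(t + 1, p)
--             for j in range(a[t - p] + 1, k):
--                 a[t] = j
--                 db(t + 1, t)
--     db(1, 1)
--     return seq  # length k**n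
--
-- def _symbols8() -> List[str]:
--     return [f"{loc}{obj}" for loc in (0, 1) for obj in (0, 1, 2, 3)]
--
-- def _build_segments_for_ntcs(
--     ntcs: int,
--     seq_len: int = 6,
--     seed: Optional[int] = None,
-- ) -> List[List[str]]:
--     """
--     Return a list of trials as node-chains (each is a list of symbols like '00','13',...).
--     Trials are contiguous slices of a de Bruijn cycle so that their consecutive pairs
--     cover exactly `ntcs` unique ordered pairs with no repeats.
--
--     If ntcs % (seq_len-1) != 0, the final trial will be shorter (rem+1 nodes).
--     """
--     assert 5 <= ntcs <= 64, "ntcs must be in [5, 64]"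
--     assert seq_len >= 2, "seq_len must be >= 2"
--     pairs_per_full_trial = seq_len - 1
--
--     symbols = _symbols8()
--     cyc_idx = _debruijn_indices(k=len(symbols), n=2)  # covers all 64 ordered pairs once
--     # rotate for reproducibility/variety
--     if seed is not None:
--         r = seed % len(cyc_idx)
--         cyc_idx = cyc_idx[r:] + cyc_idx[:r]
--
--     cycle_nodes = [symbols[i] for i in cyc_idx] + [symbols[cyc_idx[0]]]  # close cycle
--
--     trials: List[List[str]] = []
--     edge_pos = 0
--     pairs_remaining = ntcs
--
--     while pairs_remaining > 0:
--         take_pairs = min(pairs_per_full_trial, pairs_remaining)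
--         # take_pairs edges -> take_pairs+1 nodes
--         start = edge_pos
--         end = edge_pos + take_pairs
--         trials.append(cycle_nodes[start:end + 1])
--         edge_pos += take_pairs
--         pairs_remaining -= take_pairs
--
--     return trials  # last trial may be shorter when ntcs not multiple of (seq_len-1)
-- ===== SOURCE B (Python) =====
-- from typing import List, Optional
--
--
-- def _symbols8() -> List[str]:
--     return [f"{loc}{obj}" for loc in (0, 1) for obj in (0, 1, 2, 3)]
--
--
-- def _duval_debruijn(k: int, n: int) -> List[int]:
--     """FKM/Duval: concatenate, in lexicographic order, the Lyndon words over
--     {0..k-1} whose length divides n; yields the same de Bruijn sequence as the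
--     classic recursive construction."""
--     seq: List[int] = []
--     w = [0]
--     while w:
--         if n % len(w) == 0:
--             seq.extend(w)
--         w = [w[i % len(w)] for i in range(n)]
--         while w and w[-1] == k - 1:
--             w.pop()
--         if w:
--             w[-1] += 1
--     return seq
--
--
-- def _build_segments_for_ntcs(
--     ntcs: int,
--     seq_len: int = 6,
--     seed: Optional[int] = None,
-- ) -> List[List[str]]:
--     assert 5 <= ntcs <= 64, "ntcs must be in [5, 64]"
--     assert seq_len >= 2, "seq_len must be >= 2"
--     p = seq_len - 1
--
--     symbols = _symbols8()
--     idx = _duval_debruijn(len(symbols), 2)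
--     if seed is not None:
--         r = seed % len(idx)
--         idx = idx[r:] + idx[:r]
--
--     nodes = [symbols[i] for i in idx] + [symbols[idx[0]]]
--
--     rest = nodes[:ntcs + 1]
--     trials: List[List[str]] = []
--     while len(rest) > 1:
--         trials.append(rest[:p + 1])
--         rest = rest[p:]
--     return trials
-- ===== Notes on version B (the rewrite author's own statement) =====
-- stated objective: alternative
-- what changed: The de Bruijn index sequence is generated by Duval's iterative FKM Lyndon-word enumeration instead of the recursive backtracking db(t,p), and trials are produced by repeatedly chunking the needed ntcs+1-node prefix (take p+1 nodes, drop p) instead of slicing the full cycle by a running edge index.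
import Mathlib
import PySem

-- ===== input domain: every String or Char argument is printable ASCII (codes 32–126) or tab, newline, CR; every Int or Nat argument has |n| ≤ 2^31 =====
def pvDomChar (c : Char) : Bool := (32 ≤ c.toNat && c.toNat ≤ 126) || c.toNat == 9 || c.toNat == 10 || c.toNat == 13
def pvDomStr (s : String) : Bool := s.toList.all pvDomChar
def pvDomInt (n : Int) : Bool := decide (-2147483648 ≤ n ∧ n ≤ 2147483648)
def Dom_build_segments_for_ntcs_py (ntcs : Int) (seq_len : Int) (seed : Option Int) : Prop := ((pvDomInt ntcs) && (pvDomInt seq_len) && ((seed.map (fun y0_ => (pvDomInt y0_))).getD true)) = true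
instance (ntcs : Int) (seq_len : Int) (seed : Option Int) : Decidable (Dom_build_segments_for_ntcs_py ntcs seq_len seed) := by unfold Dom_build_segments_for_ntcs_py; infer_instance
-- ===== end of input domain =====

-- B replaces the recursive-backtracking de Bruijn generator by Duval's iterative
-- Lyndon-word (FKM) enumeration and consumes the needed prefix of the node cycle
-- chunk-by-chunk instead of slicing by a running edge index (objective: alternative).

-- ===== PORT A =====
-- _symbols8 (shared module helper, defined identically in both Pythons)
def symbols8 : List String :=
  [(0 : Int), 1].flatMap (fun loc => [(0 : Int), 1, 2, 3].map (fun obj => PySem.Int.toStr loc ++ PySem.Int.toStr obj))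

-- _debruijn_indices: the recursive db(t, p); the mutable list `a` and the
-- accumulator `seq` are threaded through as state.  `fuel` only makes the
-- recursion total (t increases by 1 per level, so n+2 is never exhausted).
def dbRec (k n : Nat) (fuel : Nat) (t p : Nat) (a : List Int) (seq : List Int) : List Int × List Int :=
  match fuel with
  | 0 => (a, seq)
  | fuel + 1 =>
    if t > n then
      (a, if n % p == 0 then seq ++ PySem.List.slice a (some 1) (some ((p : Int) + 1)) else seq)
    else
      let a1 := a.set t (a.getD (t - p) 0)
      let r := dbRec k n fuel (t + 1) p a1 seq
      (PySem.List.pyRange (r.1.getD (t - p) 0 + 1) (k : Int) 1).foldl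
        (fun st j => dbRec k n fuel (t + 1) t (st.1.set t j) st.2) r

def debruijn_indices (k n : Nat) : List Int :=
  (dbRec k n (n + 2) 1 1 (List.replicate (k * n) 0) []).2

-- the while pairs_remaining > 0 loop (0 < ppf is a totality guard; Python's
-- assert seq_len >= 2 means the loop is only ever run with 0 < ppf)
def loopA (nodes : List String) (ppf : Int) (edge_pos : Int) (rem : Int) (trials : List (List String)) : List (List String) :=
  if h : 0 < rem ∧ 0 < ppf then
    let tp := min ppf rem
    loopA nodes ppf (edge_pos + tp) (rem - tp)
      (trials ++ [PySem.List.slice nodes (some edge_pos) (some (edge_pos + tp + 1))])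
  else trials
termination_by rem.toNat
decreasing_by
  have h1 : 1 ≤ min ppf rem := by omega
  omega

def build_segments_for_ntcs_py (ntcs : Int) (seq_len : Int) (seed : Option Int) : List (List String) :=
  let ppf := seq_len - 1
  let symbols := symbols8
  let cyc0 := debruijn_indices symbols.length 2
  let cyc := match seed with
    | none => cyc0
    | some s =>
      let r := PySem.Int.mod s (cyc0.length : Int)
      PySem.List.slice cyc0 (some r) none ++ PySem.List.slice cyc0 none (some r)
  let nodes := cyc.map (fun i => PySem.List.pyGetD symbols i "") ++
    [PySem.List.pyGetD symbols (PySem.List.pyGetD cyc 0 0) ""]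
  loopA nodes ppf 0 ntcs []

-- ===== PORT B =====
-- inner `while w and w[-1] == k-1: w.pop()` then `if w: w[-1] += 1`, on the
-- reversed word (popping from the end = consuming the head of the reverse)
def duvalAdjust (k : Int) (rw : List Int) : List Int :=
  match rw with
  | [] => []
  | x :: rest => if x == k - 1 then duvalAdjust k rest else (x + 1) :: rest

-- outer `while w:` loop of Duval's algorithm; fuel only makes it total
-- (36 iterations are used at k=8, n=2)
def duvalLoop (k : Int) (n : Nat) (fuel : Nat) (w : List Int) (seq : List Int) : List Int :=
  match fuel with
  | 0 => seq
  | fuel + 1 =>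
    if w.isEmpty then seq
    else
      let seq1 := if n % w.length == 0 then seq ++ w else seq
      let w2 := (List.range n).map (fun i => w.getD (i % w.length) 0)
      duvalLoop k n fuel ((duvalAdjust k w2.reverse).reverse) seq1

def duval_debruijn (k : Int) (n : Nat) : List Int :=
  duvalLoop k n 100 [0] []

-- the while len(rest) > 1 chunking loop (0 < p is a totality guard, as in A)
def loopB (p : Int) (rest : List String) (trials : List (List String)) : List (List String) :=
  if h : 1 < rest.length ∧ 0 < p then
    loopB p (PySem.List.slice rest (some p) none)
      (trials ++ [PySem.List.slice rest none (some (p + 1))])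
  else trials
termination_by rest.length
decreasing_by
  rw [PySem.List.slice_from _ (by omega : (0:Int) ≤ p)]
  simp only [List.length_drop]
  omega

def build_segments_for_ntcs_py_alt (ntcs : Int) (seq_len : Int) (seed : Option Int) : List (List String) :=
  let p := seq_len - 1
  let symbols := symbols8
  let idx0 := duval_debruijn (symbols.length : Int) 2
  let idx := match seed with
    | none => idx0
    | some s =>
      let r := PySem.Int.mod s (idx0.length : Int)
      PySem.List.slice idx0 (some r) none ++ PySem.List.slice idx0 none (some r)
  let nodes := idx.map (fun i => PySem.List.pyGetD symbols i "") ++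
    [PySem.List.pyGetD symbols (PySem.List.pyGetD idx 0 0) ""]
  let rest := PySem.List.slice nodes none (some (ntcs + 1))
  loopB p rest []

-- ===== PRECONDITION & SPEC =====
-- Pre_ excludes exactly the inputs on which A's asserts raise AssertionError.
def Pre_build_segments_for_ntcs_py (ntcs : Int) (seq_len : Int) (seed : Option Int) : Prop :=
  5 ≤ ntcs ∧ ntcs ≤ 64 ∧ 2 ≤ seq_len
instance (ntcs : Int) (seq_len : Int) (seed : Option Int) : Decidable (Pre_build_segments_for_ntcs_py ntcs seq_len seed) := by unfold Pre_build_segments_for_ntcs_py; infer_instance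

def pvWitness_build_segments_for_ntcs_py : Int × Int × Option Int := (7, 3, some 5)

def Spec_build_segments_for_ntcs_py (ntcs : Int) (seq_len : Int) (seed : Option Int) (out : List (List String)) : Prop := out = build_segments_for_ntcs_py_alt ntcs seq_len seed
instance (ntcs : Int) (seq_len : Int) (seed : Option Int) (out : List (List String)) : Decidable (Spec_build_segments_for_ntcs_py ntcs seq_len seed out) := by unfold Spec_build_segments_for_ntcs_py; infer_instance

-- ===== CLAIM (what is proved, stated in full; the proofs are below) =====
def Claim_equal_build_segments_for_ntcs_py : Prop := ∀ (ntcs : Int) (seq_len : Int) (seed : Option Int), Dom_build_segments_for_ntcs_py ntcs seq_len seed → Pre_build_segments_for_ntcs_py ntcs seq_len seed → Spec_build_segments_for_ntcs_py ntcs seq_len seed (build_segments_for_ntcs_py ntcs seq_len seed)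

-- ===== LEMMAS AND PROOFS =====

-- the two de Bruijn generators produce the same 64-index sequence at k = 8, n = 2
theorem cyc_eq : debruijn_indices symbols8.length 2 = duval_debruijn (symbols8.length : Int) 2 := by
  decide

theorem cyc_len : (debruijn_indices symbols8.length 2).length = 64 := by decide

-- the two slicing loops agree: A slices nodes by a running edge index, B chunks
-- the prefix rest = (nodes.drop posN).take (K+1)
theorem loop_eq (K : Nat) : ∀ (nodes : List String) (p rem : Int) (posN : Nat) (trials : List (List String)),
    1 ≤ p → rem.toNat = K → posN + K + 1 ≤ nodes.length →
    loopA nodes p (posN : Int) rem trials = loopB p ((nodes.drop posN).take (K + 1)) trials := by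
  induction K using Nat.strong_induction_on with
  | _ K ih =>
    intro nodes p rem posN trials hp hK hlen
    by_cases hrem : 0 < rem
    · -- rem = K ≥ 1; both loops take a step
      have hK1 : 1 ≤ K := by omega
      rw [loopA, loopB]
      have hrest_len : ((nodes.drop posN).take (K + 1)).length = K + 1 := by
        simp [List.length_take, List.length_drop]; omega
      rw [dif_pos ⟨hrem, by omega⟩, dif_pos (by rw [hrest_len]; exact ⟨by omega, by omega⟩)]
      -- the appended trials coincide
      have hslice : PySem.List.slice nodes (some (posN : Int)) (some ((posN : Int) + min p rem + 1)) =
          PySem.List.slice ((nodes.drop posN).take (K + 1)) none (some (p + 1)) := by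
        rw [PySem.List.slice_toNat _ (by positivity) (by omega),
            PySem.List.slice_to _ (by omega : (0:Int) ≤ p + 1)]
        rw [List.take_take]
        simp only [Int.toNat_natCast]
        congr 1
        omega
      simp only [hslice]
      -- the next states coincide
      have hdt : List.drop p.toNat ((nodes.drop posN).take (K + 1)) =
          List.take (K + 1 - p.toNat) (nodes.drop (posN + p.toNat)) := by
        rw [List.drop_take, List.drop_drop]
      by_cases hple : p ≤ rem
      · -- full trial: min p rem = p
        have hmin : min p rem = p := by omega
        rw [hmin]
        have hcast : (posN : Int) + p = ((posN + p.toNat : Nat) : Int) := by push_cast; omega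
        rw [hcast, PySem.List.slice_from _ (by omega : (0:Int) ≤ p), hdt]
        have hKe : K + 1 - p.toNat = (K - p.toNat) + 1 := by omega
        rw [hKe]
        exact ih (K - p.toNat) (by omega) nodes p (rem - p) (posN + p.toNat) _ hp (by omega) (by omega)
      · -- last, shorter trial: min p rem = rem, both loops terminate next
        have hmin : min p rem = rem := by omega
        rw [hmin]
        rw [loopA, dif_neg (by omega)]
        rw [PySem.List.slice_from _ (by omega : (0:Int) ≤ p), hdt]
        have hKe : K + 1 - p.toNat = 0 := by omega
        rw [hKe, List.take_zero, loopB, dif_neg (by simp)]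
    · -- rem ≤ 0 (so K = 0): both loops return trials immediately
      rw [loopA, dif_neg (by omega), loopB, dif_neg]
      intro hcon
      have : ((nodes.drop posN).take (K + 1)).length ≤ K + 1 := by
        simp [List.length_take]
      omega

-- common tail: with any 65-node chain, the two slicing loops agree
theorem core_loops (ntcs seq_len : Int) (nodes : List String)
    (h5 : 5 ≤ ntcs) (h64 : ntcs ≤ 64) (h2 : 2 ≤ seq_len) (hnlen : nodes.length = 65) :
    loopA nodes (seq_len - 1) 0 ntcs [] =
      loopB (seq_len - 1) (PySem.List.slice nodes none (some (ntcs + 1))) [] := by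
  have hrest : PySem.List.slice nodes none (some (ntcs + 1)) =
      (nodes.drop 0).take (ntcs.toNat + 1) := by
    rw [PySem.List.slice_to _ (by omega), List.drop_zero]
    congr 1
    omega
  rw [hrest]
  have := loop_eq ntcs.toNat nodes (seq_len - 1) ntcs 0 [] (by omega) rfl (by omega)
  simpa using this

-- the rotated index cycle keeps its 64 elements
theorem rot_len (s : Int) :
    (PySem.List.slice (debruijn_indices symbols8.length 2)
        (some (PySem.Int.mod s ((debruijn_indices symbols8.length 2).length : Int))) none ++
      PySem.List.slice (debruijn_indices symbols8.length 2) none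
        (some (PySem.Int.mod s ((debruijn_indices symbols8.length 2).length : Int)))).length = 64 := by
  have h64' : ((debruijn_indices symbols8.length 2).length : Int) = 64 := by
    rw [cyc_len]; rfl
  have hm0 : (0:Int) ≤ PySem.Int.mod s ((debruijn_indices symbols8.length 2).length : Int) :=
    PySem.Int.mod_nonneg _ (by omega)
  have hmlt : PySem.Int.mod s ((debruijn_indices symbols8.length 2).length : Int) < 64 := by
    have := PySem.Int.mod_lt s (b := ((debruijn_indices symbols8.length 2).length : Int)) (by omega)
    omega
  rw [PySem.List.slice_from _ hm0, PySem.List.slice_to _ hm0]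
  simp only [List.length_append, List.length_drop, List.length_take, cyc_len]
  omega

-- ===== VERDICT (by name: the statement is the Claim_ definition above) =====
theorem build_segments_for_ntcs_py_spec : Claim_equal_build_segments_for_ntcs_py := by
  intro ntcs seq_len seed _ hpre
  obtain ⟨h5, h64, h2⟩ := hpre
  cases seed with
  | none =>
    unfold Spec_build_segments_for_ntcs_py build_segments_for_ntcs_py build_segments_for_ntcs_py_alt
    simp only [← cyc_eq]
    exact core_loops ntcs seq_len _ h5 h64 h2 (by simp [cyc_len])
  | some s =>
    unfold Spec_build_segments_for_ntcs_py build_segments_for_ntcs_py build_segments_for_ntcs_py_alt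
    simp only [← cyc_eq]
    exact core_loops ntcs seq_len _ h5 h64 h2 (by rw [List.length_append, List.length_map, rot_len s]; simp)
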